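-- pv_equiv track=rewrite | github.com/derekahuang/React | combine_files.py | removeLongRepeats
-- ===== SOURCE A (Python) =====
-- def removeLongRepeats(string):
--     if not isinstance(string, str):
--         return '', False
--
--     curr = ""
--     currCount = 0
--     cleanedstr = ""
--     hasLongRepeats = False
--
--     for char in string:
--         if curr == char:
--             currCount += 1
--         else:
--             curr = char
--             currCount = 1
--
--         if currCount <= 3:
--             cleanedstr += char
--         else:
--             hasLongRepeats = True
--
--     return cleanedstr, hasLongRepeats
-- ===== SOURCE B (Python) =====
-- def removeLongRepeats(string):
--     if not isinstance(string, str):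
--         return '', False
--     pieces = []
--     hasLongRepeats = False
--     i = 0
--     n = len(string)
--     while i < n:
--         j = i + 1
--         while j < n and string[j] == string[i]:
--             j += 1
--         runlen = j - i
--         pieces.append(string[i] * min(runlen, 3))
--         if runlen > 3:
--             hasLongRepeats = True
--         i = j
--     return ''.join(pieces), hasLongRepeats
-- ===== Notes on version B (the rewrite author's own statement) =====
-- stated objective: alternative
-- what changed: B scans the string run by run with a two-pointer inner loop (one run = one piece of min(len,3) copies, flag when len>3) instead of A's per-character state machine tracking curr/currCount.
import Mathlib
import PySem

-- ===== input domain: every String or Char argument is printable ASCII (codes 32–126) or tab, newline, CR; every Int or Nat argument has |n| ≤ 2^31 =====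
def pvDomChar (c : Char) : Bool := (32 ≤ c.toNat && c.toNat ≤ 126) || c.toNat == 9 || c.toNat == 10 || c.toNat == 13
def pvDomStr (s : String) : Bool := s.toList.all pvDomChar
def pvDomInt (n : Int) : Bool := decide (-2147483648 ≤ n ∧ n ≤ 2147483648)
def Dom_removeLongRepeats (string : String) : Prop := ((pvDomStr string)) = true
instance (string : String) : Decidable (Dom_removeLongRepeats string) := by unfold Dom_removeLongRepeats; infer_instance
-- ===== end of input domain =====

-- B rewrites A's per-character curr/currCount state machine as a run-by-run two-pointer scan; same cost, different decomposition.
-- The Python `isinstance` guard is vacuous for a String argument and is dropped in both ports.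

-- ===== PORT A =====
-- per-character step: state = (curr, currCount, cleanedstr (as chars), hasLongRepeats)
def stepA (st : Option Char × Nat × List Char × Bool) (ch : Char) :
    Option Char × Nat × List Char × Bool :=
  let cnt' := if st.1 = some ch then st.2.1 + 1 else 1
  let curr' := if st.1 = some ch then st.1 else some ch
  if cnt' ≤ 3 then (curr', cnt', st.2.2.1 ++ [ch], st.2.2.2)
  else (curr', cnt', st.2.2.1, true)

def removeLongRepeats (string : String) : String × Bool :=
  let r := string.toList.foldl stepA (none, 0, [], false)
  (String.mk r.2.2.1, r.2.2.2)

-- ===== PORT B =====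
-- maximal runs of equal characters: inner `while` = takeWhile/dropWhile scan
def runsB : List Char → List (Char × Nat)
  | [] => []
  | c :: cs =>
    (c, (cs.takeWhile (· == c)).length + 1) :: runsB (cs.dropWhile (· == c))
termination_by l => l.length
decreasing_by
  simpa using Nat.lt_succ_of_le (List.length_dropWhile_le _ _)

def removeLongRepeats_alt (string : String) : String × Bool :=
  let rs := runsB string.toList
  (String.mk (rs.map (fun p => List.replicate (min p.2 3) p.1)).flatten,
   rs.any (fun p => decide (3 < p.2)))

-- ===== PRECONDITION & SPEC =====
def Spec_removeLongRepeats (string : String) (out : String × Bool) : Prop := out = removeLongRepeats_alt string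
instance (string : String) (out : String × Bool) : Decidable (Spec_removeLongRepeats string out) := by unfold Spec_removeLongRepeats; infer_instance

-- ===== CLAIM (what is proved, stated in full; the proofs are below) =====
def Claim_equal_removeLongRepeats : Prop := ∀ (string : String), Dom_removeLongRepeats string → Spec_removeLongRepeats string (removeLongRepeats string)

-- ===== LEMMAS AND PROOFS =====

-- consuming a block of copies of the current character
lemma consumeA (c : Char) : ∀ (pre : List Char), (∀ x ∈ pre, x = c) →
    ∀ (k : Nat) (out : List Char) (flag : Bool),
    List.foldl stepA (some c, k, out, flag) pre =
      (some c, k + pre.length,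
       out ++ List.replicate (min pre.length (3 - k)) c,
       flag || decide (1 ≤ pre.length ∧ 3 < k + pre.length)) := by
  intro pre
  induction pre with
  | nil => intro _ k out flag; simp
  | cons x xs ih =>
    intro hx k out flag
    have hxc : c = x := (hx x (by simp)).symm
    subst hxc
    have hxs : ∀ y ∈ xs, y = c := fun y hy => hx y (by simp [hy])
    by_cases hk : k + 1 ≤ 3
    · rw [List.foldl_cons,
        show stepA (some c, k, out, flag) c = (some c, k + 1, out ++ [c], flag) from by
          simp [stepA, hk],
        ih hxs]
      have h1 : min (xs.length + 1) (3 - k) = min xs.length (3 - (k + 1)) + 1 := by omega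
      have hlist : out ++ List.replicate (min (xs.length + 1) (3 - k)) c
          = (out ++ [c]) ++ List.replicate (min xs.length (3 - (k + 1))) c := by
        rw [h1, List.replicate_succ, List.append_assoc]; rfl
      have hbool : decide (1 ≤ xs.length ∧ 3 < k + (xs.length + 1))
          = decide (1 ≤ xs.length + 1 ∧ 3 < k + (xs.length + 1)) := by
        rw [decide_eq_decide]; omega
      have hnat : (k + 1) + xs.length = k + (xs.length + 1) := by omega
      simp only [List.length_cons, hlist, hnat]
      rw [hbool]
      rfl
    · rw [List.foldl_cons,
        show stepA (some c, k, out, flag) c = (some c, k + 1, out, true) from by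
          simp [stepA, hk],
        ih hxs]
      have h1 : min (xs.length + 1) (3 - k) = 0 := by omega
      have h2 : min xs.length (3 - (k + 1)) = 0 := by omega
      have hnat : (k + 1) + xs.length = k + (xs.length + 1) := by omega
      simp only [List.length_cons, h1, h2, List.replicate_zero, List.append_nil, hnat]
      have h3 : (3 : ℕ) < k + (xs.length + 1) := by omega
      have h4 : (1 : ℕ) ≤ xs.length + 1 := by omega
      simp [h3, h4]

-- shorthand for B's two result components
def cleanOf (l : List Char) : List Char :=
  ((runsB l).map (fun p => List.replicate (min p.2 3) p.1)).flatten
def flagOf (l : List Char) : Bool :=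
  (runsB l).any (fun p => decide (3 < p.2))

lemma genLem : ∀ (n : Nat) (l : List Char), l.length ≤ n →
    ∀ (curr : Option Char) (k : Nat) (out : List Char) (flag : Bool),
    (∀ d, l.head? = some d → curr ≠ some d) →
    (List.foldl stepA (curr, k, out, flag) l).2.2 =
      (out ++ cleanOf l, flag || flagOf l) := by
  intro n
  induction n with
  | zero =>
    intro l hl curr k out flag _
    have : l = [] := List.eq_nil_of_length_eq_zero (Nat.le_zero.mp hl)
    subst this; simp [cleanOf, flagOf, runsB]
  | succ n ih =>
    intro l hl curr k out flag hhead
    cases l with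
    | nil => simp [cleanOf, flagOf, runsB]
    | cons c cs =>
      have hne : curr ≠ some c := hhead c rfl
      have hstep : stepA (curr, k, out, flag) c = (some c, 1, out ++ [c], flag) := by
        simp [stepA, hne]
      rw [List.foldl_cons, hstep]
      set pre := cs.takeWhile (· == c) with hpre
      set rest := cs.dropWhile (· == c) with hrest
      have hsplit : cs = pre ++ rest := (List.takeWhile_append_dropWhile).symm
      have hprec : ∀ x ∈ pre, x = c := by
        intro x hx
        have := List.mem_takeWhile_imp hx
        exact eq_of_beq this
      have hfold : List.foldl stepA (some c, 1, out ++ [c], flag) cs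
          = List.foldl stepA
              (some c, 1 + pre.length,
               (out ++ [c]) ++ List.replicate (min pre.length (3 - 1)) c,
               flag || decide (1 ≤ pre.length ∧ 3 < 1 + pre.length)) rest := by
        conv_lhs => rw [hsplit]
        rw [List.foldl_append, consumeA c pre hprec]
      have hrestlen : rest.length ≤ n := by
        have h1 : rest.length ≤ cs.length := List.length_dropWhile_le _ _
        have h2 : cs.length + 1 ≤ n + 1 := by simpa using hl
        omega
      have hresthead : ∀ d, rest.head? = some d → (some c : Option Char) ≠ some d := by
        intro d hd hcd
        have hdc : d = c := by injection hcd with h; exact h.symm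
        subst hdc
        have := List.head?_dropWhile_not (· == d) cs
        rw [← hrest, hd] at this
        simp at this
      rw [hfold, ih rest hrestlen _ _ _ _ hresthead]
      -- assemble: runsB (c :: cs) = (c, pre.length + 1) :: runsB rest
      have hruns : runsB (c :: cs) = (c, pre.length + 1) :: runsB rest := by
        rw [runsB]
      have hclean : cleanOf (c :: cs)
          = (c :: List.replicate (min pre.length 2) c) ++ cleanOf rest := by
        unfold cleanOf
        rw [hruns]
        simp only [List.map_cons, List.flatten_cons]
        have : min (pre.length + 1) 3 = min pre.length 2 + 1 := by omega
        rw [this, List.replicate_succ]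
      have hflag : flagOf (c :: cs)
          = (decide (3 < pre.length + 1) || flagOf rest) := by
        unfold flagOf; rw [hruns]; simp
      rw [hclean, hflag]
      have hmin : min pre.length (3 - 1) = min pre.length 2 := by norm_num
      rw [hmin]
      have hdec : decide (1 ≤ pre.length ∧ 3 < 1 + pre.length) = decide (3 < pre.length + 1) := by
        by_cases h : 3 < pre.length + 1 <;> simp [h] <;> omega
      rw [hdec]
      simp [List.append_assoc, Bool.or_assoc]

-- ===== VERDICT (by name: the statement is the Claim_ definition above) =====
theorem removeLongRepeats_spec : Claim_equal_removeLongRepeats := by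
  intro s _
  have h := genLem s.toList.length s.toList le_rfl none 0 [] false (fun d _ => by simp)
  simp only [List.nil_append, Bool.false_or] at h
  unfold Spec_removeLongRepeats removeLongRepeats removeLongRepeats_alt
  simp [h, cleanOf, flagOf]
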